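-- pv_equiv track=rewrite | github.com/cutehammond772/problem-solving-archive | 백준/Gold/25306. 연속 XOR/연속 XOR.py | solve
-- ===== SOURCE A (Python) =====
-- def solve(x):
--   result, t = 0, 1
--
--   # 첫번째 자리
--   result ^= 1 if (x % 4) == 1 or (x % 4) == 2 else 0
--
--   # 두번째 자리부터
--   while (1 << t) <= x:
--     div = x // (1 << t)
--     rem = x % (1 << t)
--
--     result ^= (1 << t) if (div % 2) and ((rem + 1) % 2) else 0
--     t += 1
--
--   return result
-- ===== SOURCE B (Python) =====
-- def solve(x):
--     # prefix XOR 0 ^ 1 ^ ... ^ x: the classic closed form on x % 4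
--     return (x, 1, x + 1, 0)[x % 4]
-- ===== Notes on version B (the rewrite author's own statement) =====
-- stated objective: simpler
-- what changed: Replaced the bit-by-bit while loop accumulating each XOR bit with the direct closed form on the remainder of x mod four for the prefix XOR of the integers up to x.
-- intended difference: For negative x with even remainder mod four, A returns only the low-bit parity because its bit loop never runs, while B returns the closed-form value; the prefix XOR is only meaningful for nonnegative x, and on this unspecified corner B's uniform closed form is the natural extension. — e.g. on solve(-2): A returns 1, B returns -1
import Mathlib
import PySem

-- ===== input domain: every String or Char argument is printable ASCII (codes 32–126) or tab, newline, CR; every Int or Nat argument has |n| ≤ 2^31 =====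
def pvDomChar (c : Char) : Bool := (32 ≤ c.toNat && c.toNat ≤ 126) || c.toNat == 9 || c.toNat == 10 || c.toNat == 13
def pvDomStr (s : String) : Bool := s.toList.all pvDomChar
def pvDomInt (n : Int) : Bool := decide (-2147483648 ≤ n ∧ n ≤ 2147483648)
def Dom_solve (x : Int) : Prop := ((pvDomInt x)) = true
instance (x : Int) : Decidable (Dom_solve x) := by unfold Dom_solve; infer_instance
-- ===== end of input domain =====

-- B replaces A's bit-by-bit while loop for the prefix XOR 0^1^...^x by the constant-time x%4 closed form.

-- ===== PORT A =====
-- the 'while (1 << t) <= x' loop; terminates because t < 2^t ≤ x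
def solveLoop (x result : Int) (t : Nat) : Int :=
  if ((1 : Int) <<< t) ≤ x then
    solveLoop x
      (PySem.Int.bxor result
        (if PySem.Int.mod (PySem.Int.floordiv x ((1 : Int) <<< t)) 2 ≠ 0 ∧
            PySem.Int.mod (PySem.Int.mod x ((1 : Int) <<< t) + 1) 2 ≠ 0
         then (1 : Int) <<< t else 0))
      (t + 1)
  else result
termination_by x.toNat + 1 - t
decreasing_by
  rename_i h
  have h2 : ((2 : Int) ^ t) ≤ x := by simpa [Int.shiftLeft_eq] using h
  have hx0 : (0 : Int) ≤ x := le_trans (by positivity) h2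
  have h3 : (2 ^ t : Nat) ≤ x.toNat := by
    rw [Int.le_toNat hx0]; push_cast; exact h2
  have h4 : t < 2 ^ t := Nat.lt_two_pow_self
  omega

def solve (x : Int) : Int :=
  solveLoop x
    (PySem.Int.bxor 0 (if PySem.Int.mod x 4 = 1 ∨ PySem.Int.mod x 4 = 2 then 1 else 0)) 1

-- ===== PORT B =====
-- Source B's 4-tuple indexed by r = x % 4 ∈ {0,1,2,3}, transliterated as the index chain
def solve_alt (x : Int) : Int :=
  let r := PySem.Int.mod x 4
  if r = 0 then x else if r = 1 then 1 else if r = 2 then x + 1 else 0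

-- ===== PRECONDITION & SPEC =====
-- For negative x with even remainder mod four, A returns only the low-bit parity because its
-- bit loop never runs, while B returns the closed-form value; the prefix XOR is only meaningful
-- for nonnegative x, and on this unspecified corner B's uniform closed form is the natural
-- extension.
def D_solve (x : Int) : Prop := x < 0 ∧ (x % 4 = 0 ∨ x % 4 = 2)
instance (x : Int) : Decidable (D_solve x) := by unfold D_solve; infer_instance

def Spec_solve (x : Int) (out : Int) : Prop := ¬ D_solve x → out = solve_alt x
instance (x : Int) (out : Int) : Decidable (Spec_solve x out) := by unfold Spec_solve; infer_instance

def pvDiffWitness_solve : Int := (-2)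
def pvDiffWitnessOut_solve : Int × Int := (1, -1)

-- ===== CLAIM (what is proved, stated in full; the proofs are below) =====
def Claim_unchanged_solve : Prop := ∀ (x : Int), Dom_solve x → Spec_solve x (solve x)
def Claim_changed_solve : Prop := Dom_solve (pvDiffWitness_solve) ∧ D_solve (pvDiffWitness_solve) ∧ solve (pvDiffWitness_solve) = pvDiffWitnessOut_solve.1 ∧ solve_alt (pvDiffWitness_solve) = pvDiffWitnessOut_solve.2 ∧ pvDiffWitnessOut_solve.1 ≠ pvDiffWitnessOut_solve.2
def Claim_exact_solve : Prop := ∀ (x : Int), Dom_solve x → D_solve x → solve x ≠ solve_alt x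

-- ===== LEMMAS AND PROOFS =====

-- XOR with a fresh high bit is addition
lemma nat_xor_two_pow (t a : Nat) (h : a < 2 ^ t) : a ^^^ 2 ^ t = a + 2 ^ t := by
  apply Nat.eq_of_testBit_eq
  intro i
  rcases lt_trichotomy i t with hi | rfl | hi
  · simp [Nat.testBit_xor, Nat.testBit_two_pow_of_ne (by omega : t ≠ i),
      Nat.testBit_two_pow_add_gt hi, Nat.add_comm a (2 ^ t)]
  · simp [Nat.testBit_xor, Nat.add_comm a (2 ^ i), Nat.testBit_two_pow_add_eq,
      Nat.testBit_lt_two_pow h]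
  · have h3 : 2 ^ (t + 1) ≤ 2 ^ i := Nat.pow_le_pow_right (by norm_num) hi
    have h5 : 2 ^ (t + 1) = 2 * 2 ^ t := by ring
    simp [Nat.testBit_xor, Nat.testBit_two_pow_of_ne (by omega : t ≠ i),
      Nat.testBit_lt_two_pow (by omega : a < 2 ^ i),
      Nat.testBit_lt_two_pow (by omega : a + 2 ^ t < 2 ^ i)]

lemma int_bxor_two_pow (t : Nat) (r : Int) (h0 : 0 ≤ r) (h : r < 2 ^ t) :
    PySem.Int.bxor r (2 ^ t) = r + 2 ^ t := by
  rw [PySem.Int.bxor_of_nonneg h0 (by positivity : (0 : Int) ≤ 2 ^ t)]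
  have ht : ((2 : Int) ^ t).toNat = 2 ^ t := by
    have : ((2 : Int) ^ t) = ((2 ^ t : Nat) : Int) := by push_cast; ring
    rw [this, Int.toNat_natCast]
  rw [ht, nat_xor_two_pow t r.toNat (by omega)]
  push_cast
  omega

lemma parity_of_emod_two_pow (x : Int) (t : Nat) (ht : 1 ≤ t) :
    x % 2 ^ t % 2 = x % 2 :=
  Int.emod_emod_of_dvd x (dvd_pow_self 2 (by omega))

lemma shift_one (t : Nat) : ((1 : Int) <<< t) = 2 ^ t := by
  simp [Int.shiftLeft_eq]

-- on odd x every loop step adds nothing: rem = x % 2^t is odd, so (rem+1) % 2 = 0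
lemma loop_odd (x : Int) (hx : x % 2 = 1) :
    ∀ (r : Int) (t : Nat), 1 ≤ t → solveLoop x r t = r := by
  intro r t
  fun_induction solveLoop x r t with
  | case1 r t h ih =>
    intro ht
    have hrem : PySem.Int.mod (PySem.Int.mod x ((1 : Int) <<< t) + 1) 2 = 0 := by
      rw [shift_one, PySem.Int.mod_eq_emod_of_pos (by positivity),
        PySem.Int.mod_eq_emod_of_pos (by norm_num)]
      have := parity_of_emod_two_pow x t ht
      have h1 := Int.emod_nonneg (x % 2 ^ t + 1) (by norm_num : (2 : Int) ≠ 0)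
      have h2 : (x % 2 ^ t + 1) % 2 < 2 := Int.emod_lt_of_pos _ (by norm_num)
      omega
    have hc : ¬(PySem.Int.mod (PySem.Int.floordiv x ((1 : Int) <<< t)) 2 ≠ 0 ∧
        PySem.Int.mod (PySem.Int.mod x ((1 : Int) <<< t) + 1) 2 ≠ 0) := fun hcon => hcon.2 hrem
    rw [if_neg hc]
    rw [dif_neg hc] at ih
    simpa using ih (by omega)
  | case2 r t h =>
    intro ht
    rfl

-- on even x the loop adds exactly the bits of x from position t upward
lemma loop_even (x : Int) (hx0 : 0 ≤ x) (hx : x % 2 = 0) :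
    ∀ (r : Int) (t : Nat), 1 ≤ t → 0 ≤ r → r < 2 ^ t →
      solveLoop x r t = r + 2 ^ t * (x / 2 ^ t) := by
  intro r t
  fun_induction solveLoop x r t with
  | case1 r t h ih =>
    intro ht hr0 hrt
    have hP : ((1 : Int) <<< t) = 2 ^ t := shift_one t
    have hdv : PySem.Int.floordiv x ((1 : Int) <<< t) = x / 2 ^ t := by
      rw [hP, PySem.Int.floordiv_eq_ediv_of_pos (by positivity)]
    have hrem : PySem.Int.mod x ((1 : Int) <<< t) = x % 2 ^ t := by
      rw [hP, PySem.Int.mod_eq_emod_of_pos (by positivity)]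
    have hremeven : x % 2 ^ t % 2 = 0 := by rw [parity_of_emod_two_pow x t ht]; omega
    have hrb := Int.emod_nonneg x (by positivity : ((2 : Int) ^ t) ≠ 0)
    have hcond2 : PySem.Int.mod (PySem.Int.mod x ((1 : Int) <<< t) + 1) 2 ≠ 0 := by
      rw [hrem, PySem.Int.mod_eq_emod_of_pos (by norm_num)]
      omega
    have hq := Int.emod_add_mul_ediv (x / 2 ^ t) 2
    have hdiv2 : x / 2 ^ t / 2 = x / 2 ^ (t + 1) := by
      rw [pow_succ]
      exact Int.ediv_ediv_of_nonneg (by positivity)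
    have hbit0 := Int.emod_nonneg (x / 2 ^ t) (by norm_num : (2 : Int) ≠ 0)
    have hbit2 : x / 2 ^ t % 2 < 2 := Int.emod_lt_of_pos _ (by norm_num)
    have hpow : (2 : Int) ^ (t + 1) = 2 * 2 ^ t := by ring
    by_cases hodd : PySem.Int.mod (PySem.Int.floordiv x ((1 : Int) <<< t)) 2 ≠ 0
    · -- bit t of x is set: the step adds 2^t
      have hbit1 : x / 2 ^ t % 2 = 1 := by
        rw [hdv, PySem.Int.mod_eq_emod_of_pos (by norm_num)] at hodd; omega
      rw [if_pos ⟨hodd, hcond2⟩, hP, int_bxor_two_pow t r hr0 hrt]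
      rw [dif_pos ⟨hodd, hcond2⟩, hP, int_bxor_two_pow t r hr0 hrt] at ih
      rw [ih (by omega) (by positivity) (by omega)]
      rw [hbit1] at hq
      rw [← hdiv2]
      linear_combination (2 : Int) ^ t * hq
    · -- bit t of x is clear: the step adds nothing
      have hbit1 : x / 2 ^ t % 2 = 0 := by
        rw [hdv, PySem.Int.mod_eq_emod_of_pos (by norm_num)] at hodd; omega
      have hc : ¬(PySem.Int.mod (PySem.Int.floordiv x ((1 : Int) <<< t)) 2 ≠ 0 ∧
          PySem.Int.mod (PySem.Int.mod x ((1 : Int) <<< t) + 1) 2 ≠ 0) := by tauto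
      rw [if_neg hc]
      rw [dif_neg hc] at ih
      rw [PySem.Int.bxor_zero] at ih ⊢
      rw [ih (by omega) hr0 (by omega)]
      rw [hbit1] at hq
      rw [← hdiv2]
      linear_combination (2 : Int) ^ t * hq
  | case2 r t h =>
    intro ht hr0 hrt
    have hP : ((1 : Int) <<< t) = 2 ^ t := shift_one t
    rw [hP] at h
    rw [not_le] at h
    rw [Int.ediv_eq_zero_of_lt hx0 h]
    ring

-- for negative x the loop never runs: solve x is the low-bit parity term only
lemma solve_neg (x : Int) (hx : x < 0) :
    solve x = (if PySem.Int.mod x 4 = 1 ∨ PySem.Int.mod x 4 = 2 then 1 else 0) := by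
  unfold solve
  rw [solveLoop,
    if_neg (by intro hle; rw [shift_one 1] at hle; norm_num at hle; omega)]
  split <;> decide

lemma solve_alt_eq (x : Int) :
    solve_alt x =
      (if PySem.Int.mod x 4 = 0 then x
       else if PySem.Int.mod x 4 = 1 then 1
       else if PySem.Int.mod x 4 = 2 then x + 1 else 0) := rfl

lemma pymod4 (x : Int) : PySem.Int.mod x 4 = x % 4 :=
  PySem.Int.mod_eq_emod_of_pos (by norm_num)

-- ===== VERDICT (by name: the statements are the Claim_ definitions above) =====
theorem solve_spec : Claim_unchanged_solve := by
  intro x _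
  unfold Spec_solve
  intro hD
  unfold D_solve at hD
  rw [solve_alt_eq, pymod4]
  have hb4 := Int.emod_nonneg x (by norm_num : (4 : Int) ≠ 0)
  have hl4 : x % 4 < 4 := Int.emod_lt_of_pos _ (by norm_num)
  have h24 : x % 4 % 2 = x % 2 := Int.emod_emod_of_dvd x (by norm_num)
  by_cases hneg : x < 0
  · -- outside D_: x % 4 ∈ {1, 3}
    rw [solve_neg x hneg, pymod4]
    interval_cases h : (x % 4) <;> simp_all
  · rw [not_lt] at hneg
    unfold solve
    interval_cases h : (x % 4) <;> norm_num [pymod4, h]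
    · rw [loop_even x hneg (by omega) 0 1 le_rfl le_rfl (by norm_num)]
      norm_num
      omega
    · exact loop_odd x (by omega) 1 1 le_rfl
    · rw [show PySem.Int.bxor 0 (1 : Int) = 1 from by decide,
        loop_even x hneg (by omega) 1 1 le_rfl (by norm_num) (by norm_num)]
      norm_num
      omega
    · exact loop_odd x (by omega) 0 1 le_rfl

theorem solve_changed : Claim_changed_solve := by
  unfold Claim_changed_solve
  refine ⟨by decide, by decide, ?_, by decide, by decide⟩
  rw [show pvDiffWitness_solve = (-2 : Int) from rfl, solve_neg (-2) (by norm_num)]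
  decide

theorem solve_tight : Claim_exact_solve := by
  intro x _ hD
  obtain ⟨hneg, h02⟩ := hD
  rw [solve_neg x hneg, solve_alt_eq, pymod4]
  rcases h02 with h | h <;> simp [h] <;> omega
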